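-- pv_equiv track=rewrite | github.com/manwar/perlweeklychallenge-club | challenge-063/lubos-kolouch/python/ch-2.py | min_rotations
-- ===== SOURCE A (Python) =====
-- def min_rotations(word: str) -> int:
--     original_word = word
--     rotation_count = 1
--
--     while True:
--         rotation = rotation_count % len(word)
--         word = word[rotation:] + word[:rotation]
--         if word == original_word:
--             break
--         rotation_count += 1
--
--     return rotation_count
-- ===== SOURCE B (Python) =====
-- def min_rotations(word: str) -> int:
--     # Find the smallest rotation period p (it must divide len(word)),
--     # then find the least k >= 1 with 1+2+...+k divisible by p by a
--     # purely arithmetic loop -- no string is ever rebuilt per step.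
--     n = len(word)
--     p = n
--     for d in range(1, n + 1):
--         if n % d == 0 and word[d:] + word[:d] == word:
--             p = d
--             break
--     k, t = 1, 1 % p
--     while t:
--         k += 1
--         t = (t + k) % p
--     return k
-- ===== Notes on version B (the rewrite author's own statement) =====
-- stated objective: faster
-- what changed: B computes the minimal rotation period p by testing only the divisors of len(word), then finds the least k with 1+2+...+k divisible by p with an O(1)-per-step arithmetic loop, instead of A's loop that rebuilds and compares the whole string on every step.
import Mathlib
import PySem

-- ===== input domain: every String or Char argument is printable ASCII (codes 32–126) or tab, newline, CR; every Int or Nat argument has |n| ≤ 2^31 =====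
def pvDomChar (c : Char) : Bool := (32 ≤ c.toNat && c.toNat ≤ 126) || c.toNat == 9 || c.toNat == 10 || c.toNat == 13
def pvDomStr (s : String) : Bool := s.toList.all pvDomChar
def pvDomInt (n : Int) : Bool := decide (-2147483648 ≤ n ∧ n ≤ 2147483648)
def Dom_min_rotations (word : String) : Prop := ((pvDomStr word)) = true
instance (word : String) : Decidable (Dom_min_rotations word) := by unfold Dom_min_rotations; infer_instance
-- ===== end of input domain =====

-- B replaces A's rebuild-and-compare rotation loop by computing the minimal rotation
-- period (testing only divisors of the length) and then an arithmetic loop mod that period.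


-- ===== PORT A =====
-- A's 'while True' loop; the fuel bound 2*len+1 only makes the recursion total and is
-- proved sufficient (the fuel-0 branch is never reached on Pre_ inputs) in the lemmas below.
def pvALoop (orig : List Char) : List Char → Int → Nat → Int
  | _, rc, 0 => rc
  | word, rc, fuel+1 =>
    let rotation := PySem.Int.mod rc ((word.length : Int))
    let word' := PySem.List.slice word (some rotation) none ++
                 PySem.List.slice word none (some rotation)
    if word' = orig then rc else pvALoop orig word' (rc + 1) fuel

def min_rotations (word : String) : Int :=
  pvALoop word.toList word.toList 1 (2 * word.toList.length + 1)

-- ===== PORT B =====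
-- the 'for d in range(1, n+1): … break' scan for the period p
def pvScan (w : List Char) (n : Int) : List Int → Int
  | [] => n
  | d :: ds =>
    if PySem.Int.mod n d = 0 ∧
        PySem.List.slice w (some d) none ++ PySem.List.slice w none (some d) = w
    then d
    else pvScan w n ds

-- the 'while t: k += 1; t = (t + k) % p' loop; fuel 2*len+1 proved sufficient below
def pvBLoop (p : Int) : Int → Int → Nat → Int
  | k, _, 0 => k
  | k, t, fuel+1 =>
    if t = 0 then k else pvBLoop p (k + 1) (PySem.Int.mod (t + (k + 1)) p) fuel

def min_rotations_alt (word : String) : Int :=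
  let w := word.toList
  let n : Int := (w.length : Int)
  let p := pvScan w n (PySem.List.pyRange 1 (n + 1) 1)
  pvBLoop p 1 (PySem.Int.mod 1 p) (2 * w.length + 1)

-- ===== PRECONDITION & SPEC =====
-- Pre_ excludes only the empty string, on which A raises ZeroDivisionError (len(word) = 0).
def Pre_min_rotations (word : String) : Prop := word.toList ≠ []
instance (word : String) : Decidable (Pre_min_rotations word) := by
  unfold Pre_min_rotations; infer_instance

def pvWitness_min_rotations : String := "ab"

def Spec_min_rotations (word : String) (out : Int) : Prop := out = min_rotations_alt word
instance (word : String) (out : Int) : Decidable (Spec_min_rotations word out) := by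
  unfold Spec_min_rotations; infer_instance

-- ===== CLAIM (what is proved, stated in full; the proofs are below) =====
def Claim_equal_min_rotations : Prop :=
  ∀ (word : String), Dom_min_rotations word → Pre_min_rotations word →
    Spec_min_rotations word (min_rotations word)

-- ===== LEMMAS AND PROOFS =====

-- triangular numbers: pvT k = 1 + 2 + … + k
def pvT : Nat → Nat
  | 0 => 0
  | k+1 => pvT k + k + 1

lemma pvT_two_mul (k : Nat) : 2 * pvT k = k * (k + 1) := by
  induction k with
  | zero => rfl
  | succ k ih => simp only [pvT]; ring_nf; ring_nf at ih; omega

lemma pvEx (w : List Char) (hw : w ≠ []) : ∃ s, 0 < s ∧ w.rotate s = w :=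
  ⟨w.length, List.length_pos_of_ne_nil hw, List.rotate_length w⟩

-- the minimal rotation period of w
def pvP0 (w : List Char) (hw : w ≠ []) : Nat := Nat.find (pvEx w hw)

lemma pvP0_pos (w : List Char) (hw : w ≠ []) : 0 < pvP0 w hw :=
  (Nat.find_spec (pvEx w hw)).1

lemma pvP0_rot (w : List Char) (hw : w ≠ []) : w.rotate (pvP0 w hw) = w :=
  (Nat.find_spec (pvEx w hw)).2

lemma pvP0_min (w : List Char) (hw : w ≠ []) :
    ∀ s, 0 < s → s < pvP0 w hw → w.rotate s ≠ w := by
  intro s hs hlt h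
  exact (Nat.find_min (pvEx w hw) hlt) ⟨hs, h⟩

lemma pvRot_mul (w : List Char) (p q : Nat) (h : w.rotate p = w) :
    w.rotate (p * q) = w := by
  induction q with
  | zero => simp
  | succ q ih =>
    have : p * (q + 1) = p * q + p := by ring
    rw [this, ← List.rotate_rotate, ih, h]

-- the key fact: w.rotate s = w  ↔  pvP0 ∣ s
lemma pvFix_iff (w : List Char) (hw : w ≠ []) (s : Nat) :
    w.rotate s = w ↔ pvP0 w hw ∣ s := by
  constructor
  · intro h
    set p := pvP0 w hw with hp
    have hq : p * (s / p) + s % p = s := Nat.div_add_mod s p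
    have hfixq : w.rotate (p * (s / p)) = w := pvRot_mul w p _ (pvP0_rot w hw)
    have hr : w.rotate (s % p) = w := by
      have := List.rotate_rotate w (p * (s / p)) (s % p)
      rw [hfixq, hq, h] at this
      exact this
    by_cases h0 : s % p = 0
    · exact Nat.dvd_of_mod_eq_zero h0
    · exact absurd hr (pvP0_min w hw _ (Nat.pos_of_ne_zero h0)
        (Nat.mod_lt _ (pvP0_pos w hw)))
  · rintro ⟨q, rfl⟩
    exact pvRot_mul w _ q (pvP0_rot w hw)

lemma pvP0_dvd_len (w : List Char) (hw : w ≠ []) : pvP0 w hw ∣ w.length :=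
  (pvFix_iff w hw _).mp (List.rotate_length w)

lemma pvP0_le_len (w : List Char) (hw : w ≠ []) : pvP0 w hw ≤ w.length :=
  Nat.le_of_dvd (List.length_pos_of_ne_nil hw) (pvP0_dvd_len w hw)

-- the scan condition at a candidate d, 0 < d ≤ len
lemma pvCond_iff (w : List Char) (hw : w ≠ []) (d : Nat)
    (hdn : d ≤ w.length) :
    (PySem.Int.mod ((w.length : Nat) : Int) ((d : Nat) : Int) = 0 ∧
      PySem.List.slice w (some ((d : Nat) : Int)) none ++
        PySem.List.slice w none (some ((d : Nat) : Int)) = w) ↔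
    (d ∣ w.length ∧ pvP0 w hw ∣ d) := by
  rw [PySem.Int.mod_eq_zero_iff_dvd, Int.natCast_dvd_natCast,
      PySem.List.slice_from_natCast, PySem.List.slice_to_natCast,
      ← List.rotate_eq_drop_append_take hdn, pvFix_iff w hw]

lemma pvScan_range' (w : List Char) (hw : w ≠ []) :
    ∀ (cnt lo : Nat), 0 < lo → lo ≤ pvP0 w hw → pvP0 w hw < lo + cnt →
      pvScan w ((w.length : Nat) : Int)
        ((List.range' lo cnt).map (fun d => ((d : Nat) : Int))) =
        ((pvP0 w hw : Nat) : Int) := by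
  intro cnt
  induction cnt with
  | zero => intro lo h1 h2 h3; omega
  | succ cnt ih =>
    intro lo h1 h2 h3
    rw [List.range'_succ, List.map_cons]
    by_cases hlo : lo = pvP0 w hw
    · have hcond := (pvCond_iff w hw lo (le_trans h2 (pvP0_le_len w hw))).mpr
        ⟨by rw [hlo]; exact pvP0_dvd_len w hw, by rw [hlo]⟩
      rw [pvScan, if_pos hcond]
      exact congrArg _ hlo
    · have hlt : lo < pvP0 w hw := lt_of_le_of_ne h2 hlo
      rw [pvScan, if_neg, ih (lo + 1) (by omega) (by omega) (by omega)]
      intro hc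
      have := ((pvCond_iff w hw lo (le_trans (le_of_lt hlt) (pvP0_le_len w hw))).mp hc).2
      exact absurd (Nat.le_of_dvd h1 this) (by omega)

lemma pvScan_eval (w : List Char) (hw : w ≠ []) :
    pvScan w ((w.length : Nat) : Int)
      (PySem.List.pyRange 1 (((w.length : Nat) : Int) + 1) 1) =
      ((pvP0 w hw : Nat) : Int) := by
  have hrange : PySem.List.pyRange 1 (((w.length : Nat) : Int) + 1) 1 =
      (List.range' 1 w.length).map (fun d => ((d : Nat) : Int)) := by
    rw [PySem.List.pyRange_one, List.range'_eq_map_range, List.map_map]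
    have : ((((w.length : Nat) : Int) + 1 - 1)).toNat = w.length := by omega
    rw [this]
    apply List.map_congr_left
    intro k _
    simp only [Function.comp_apply]
    push_cast
    ring
  rw [hrange]
  exact pvScan_range' w hw w.length 1 (by omega) (pvP0_pos w hw)
    (by have := pvP0_le_len w hw; omega)

lemma pvT_dvd (w : List Char) (hw : w ≠ []) :
    pvP0 w hw ∣ pvT (2 * pvP0 w hw - 1) := by
  have hp := pvP0_pos w hw
  have h2 : 2 * pvT (2 * pvP0 w hw - 1) = (2 * pvP0 w hw - 1) * (2 * pvP0 w hw - 1 + 1) :=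
    pvT_two_mul _
  have h3 : 2 * pvT (2 * pvP0 w hw - 1) = 2 * (pvP0 w hw * (2 * pvP0 w hw - 1)) := by
    rw [h2]
    have h4 : 2 * pvP0 w hw - 1 + 1 = 2 * pvP0 w hw := by omega
    rw [h4]; ring
  exact ⟨2 * pvP0 w hw - 1, Nat.eq_of_mul_eq_mul_left (by norm_num) h3⟩

lemma pvNEx (w : List Char) (hw : w ≠ []) : ∃ k, 0 < k ∧ pvP0 w hw ∣ pvT k :=
  ⟨2 * pvP0 w hw - 1, by have := pvP0_pos w hw; omega, pvT_dvd w hw⟩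

-- the answer: the least k ≥ 1 with pvP0 ∣ pvT k
def pvNk (w : List Char) (hw : w ≠ []) : Nat := Nat.find (pvNEx w hw)

lemma pvNk_pos (w : List Char) (hw : w ≠ []) : 0 < pvNk w hw :=
  (Nat.find_spec (pvNEx w hw)).1

lemma pvNk_dvd (w : List Char) (hw : w ≠ []) : pvP0 w hw ∣ pvT (pvNk w hw) :=
  (Nat.find_spec (pvNEx w hw)).2

lemma pvNk_le (w : List Char) (hw : w ≠ []) : pvNk w hw ≤ 2 * pvP0 w hw - 1 :=
  Nat.find_min' (pvNEx w hw) ⟨by have := pvP0_pos w hw; omega, pvT_dvd w hw⟩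

lemma pvNk_eq (w : List Char) (hw : w ≠ []) (k : Nat) (hk : 0 < k)
    (hdvd : pvP0 w hw ∣ pvT k) (hmin : ∀ i, 0 < i → i ≤ k - 1 → ¬ pvP0 w hw ∣ pvT i) :
    pvNk w hw = k := by
  refine le_antisymm (Nat.find_min' _ ⟨hk, hdvd⟩) ?_
  by_contra h
  exact hmin _ (pvNk_pos w hw) (by omega) (pvNk_dvd w hw)

-- rotations compose modulo the length
lemma pvRot_mod_add (w : List Char) (a b : Nat) :
    w.rotate (a % w.length + b % w.length) = w.rotate (a + b) := by
  rw [← List.rotate_rotate, List.rotate_mod]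
  have : (w.rotate a).rotate (b % w.length) = (w.rotate a).rotate b := by
    rw [← List.length_rotate w a, List.rotate_mod]
  rw [this, List.rotate_rotate]

-- A's loop computes pvNk
lemma pvALoop_eq (w : List Char) (hw : w ≠ []) :
    ∀ (fuel j : Nat), (∀ i, 0 < i → i ≤ j → ¬ pvP0 w hw ∣ pvT i) →
      pvNk w hw ≤ j + fuel →
      pvALoop w (w.rotate (pvT j % w.length)) ((j : Int) + 1) fuel =
        ((pvNk w hw : Nat) : Int) := by
  intro fuel
  induction fuel with
  | zero =>
    intro j hmin hle
    exact absurd (pvNk_dvd w hw) (hmin _ (pvNk_pos w hw) (by omega))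
  | succ fuel ih =>
    intro j hmin hle
    have hn : 0 < w.length := List.length_pos_of_ne_nil hw
    simp only [pvALoop]
    have hlen : ((w.rotate (pvT j % w.length)).length : Int) = ((w.length : Nat) : Int) := by
      rw [List.length_rotate]
    have hcast : ((j : Int) + 1) = (((j + 1 : Nat) : Nat) : Int) := by push_cast; ring
    have hrot : PySem.Int.mod ((j : Int) + 1) ((w.rotate (pvT j % w.length)).length : Int) =
        (((j + 1) % w.length : Nat) : Int) := by
      rw [hlen, hcast, PySem.Int.mod_natCast]
    rw [hrot, PySem.List.slice_from_natCast, PySem.List.slice_to_natCast]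
    have hmle : (j + 1) % w.length ≤ (w.rotate (pvT j % w.length)).length := by
      rw [List.length_rotate]
      exact le_of_lt (Nat.mod_lt _ hn)
    rw [← List.rotate_eq_drop_append_take hmle, List.rotate_rotate]
    have hw' : w.rotate (pvT j % w.length + (j + 1) % w.length) = w.rotate (pvT (j + 1)) := by
      rw [pvRot_mod_add]
      rfl
    rw [hw']
    by_cases hfix : w.rotate (pvT (j + 1)) = w
    · rw [if_pos hfix]
      have hdvd : pvP0 w hw ∣ pvT (j + 1) := (pvFix_iff w hw _).mp hfix
      have := pvNk_eq w hw (j + 1) (by omega) hdvd (by intro i h1 h2; exact hmin i h1 (by omega))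
      rw [this]; push_cast; ring
    · rw [if_neg hfix]
      have hnd : ¬ pvP0 w hw ∣ pvT (j + 1) := fun h => hfix ((pvFix_iff w hw _).mpr h)
      have h2 : pvT (j + 1) % w.length = pvT (j + 1) % w.length := rfl
      have hrw : w.rotate (pvT (j + 1)) = w.rotate (pvT (j + 1) % w.length) := by
        rw [List.rotate_mod]
      rw [hrw]
      have hcast2 : ((j : Int) + 1 + 1) = (((j + 1 : Nat)) : Int) + 1 := by push_cast; ring
      rw [hcast2]
      exact ih (j + 1)
        (by intro i h1 h2; rcases Nat.lt_or_ge i (j + 1) with h | h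
            · exact hmin i h1 (by omega)
            · have : i = j + 1 := by omega
              rw [this]; exact hnd)
        (by omega)

-- B's loop computes pvNk
lemma pvBLoop_eq (w : List Char) (hw : w ≠ []) :
    ∀ (fuel k : Nat), 0 < k → (∀ i, 0 < i → i < k → ¬ pvP0 w hw ∣ pvT i) →
      pvNk w hw < k + fuel →
      pvBLoop ((pvP0 w hw : Nat) : Int) ((k : Nat) : Int)
        (((pvT k % pvP0 w hw : Nat) : Nat) : Int) fuel = ((pvNk w hw : Nat) : Int) := by
  intro fuel
  induction fuel with
  | zero =>
    intro k hk hmin hlt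
    exact absurd (pvNk_dvd w hw) (hmin _ (pvNk_pos w hw) (by omega))
  | succ fuel ih =>
    intro k hk hmin hlt
    simp only [pvBLoop]
    by_cases hdvd : pvP0 w hw ∣ pvT k
    · have h0 : pvT k % pvP0 w hw = 0 := by
        obtain ⟨c, hc⟩ := hdvd
        rw [hc, Nat.mul_mod_right]
      rw [if_pos (by rw [h0]; norm_num)]
      have := pvNk_eq w hw k hk hdvd (by intro i h1 h2; exact hmin i h1 (by omega))
      rw [this]
    · have hne : (((pvT k % pvP0 w hw : Nat) : Nat) : Int) ≠ 0 := by
        simp only [ne_eq, Nat.cast_eq_zero]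
        intro h
        exact hdvd (Nat.dvd_of_mod_eq_zero h)
      rw [if_neg hne]
      have hstep : PySem.Int.mod ((((pvT k % pvP0 w hw : Nat) : Nat) : Int) + (((k : Nat) : Int) + 1))
          ((pvP0 w hw : Nat) : Int) = (((pvT (k + 1) % pvP0 w hw : Nat) : Nat) : Int) := by
        have hc : (((pvT k % pvP0 w hw : Nat) : Nat) : Int) + (((k : Nat) : Int) + 1) =
            (((pvT k % pvP0 w hw + (k + 1) : Nat) : Nat) : Int) := by push_cast; ring
        rw [hc, PySem.Int.mod_natCast, Nat.mod_add_mod]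
        rfl
      have hck : (((k : Nat) : Int) + 1) = (((k + 1 : Nat) : Nat) : Int) := by push_cast; ring
      rw [hstep, hck]
      exact ih (k + 1) (by omega)
        (by intro i h1 h2; rcases Nat.lt_or_ge i k with h | h
            · exact hmin i h1 h
            · have : i = k := by omega
              rw [this]; exact hdvd)
        (by omega)

-- ===== VERDICT (by name: the statement is the Claim_ definition above) =====
theorem min_rotations_spec : Claim_equal_min_rotations := by
  intro word _ hpre
  have hw : word.toList ≠ [] := hpre
  show min_rotations word = min_rotations_alt word
  have hn : 0 < word.toList.length := List.length_pos_of_ne_nil hw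
  have hp := pvP0_pos word.toList hw
  have hple := pvP0_le_len word.toList hw
  have hnk := pvNk_le word.toList hw
  -- A side
  have hA : min_rotations word = ((pvNk word.toList hw : Nat) : Int) := by
    unfold min_rotations
    have h := pvALoop_eq word.toList hw (2 * word.toList.length + 1) 0
      (by intro i h1 h2; omega) (by omega)
    simp only [pvT, Nat.zero_mod, List.rotate_zero, Nat.cast_zero, zero_add] at h
    exact h
  -- B side
  have hB : min_rotations_alt word = ((pvNk word.toList hw : Nat) : Int) := by
    simp only [min_rotations_alt]
    rw [pvScan_eval word.toList hw]
    have h1 : (1 : Int) = (((1 : Nat) : Nat) : Int) := by norm_num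
    rw [h1, PySem.Int.mod_natCast]
    have hT1 : (1 : Nat) % pvP0 word.toList hw = pvT 1 % pvP0 word.toList hw := rfl
    rw [hT1]
    exact pvBLoop_eq word.toList hw (2 * word.toList.length + 1) 1 (by omega)
      (by intro i h1 h2; omega) (by omega)
  rw [hA, hB]
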